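-- pv_equiv track=rewrite | github.com/philornot/Matura2026 | maj2022/zadanie1ŹLE/1_2.py | algorytm
-- ===== SOURCE A (Python) =====
-- def algorytm(n, A):
--     k = 0
--     B = [0] * n
--     for i in range(n):
--         if A[i] in B:
--             k += 1
--         B[i] = A[i]
--     return k
-- ===== SOURCE B (Python) =====
-- def algorytm(n, A):
--     seen = set()
--     for i in range(n):
--         if A[i] != 0:
--             seen.add(A[i])
--     return max(n, 0) - len(seen)
-- ===== Notes on version B (the rewrite author's own statement) =====
-- stated objective: faster
-- what changed: Replaces A's growing-buffer membership scan (checking A[i] against a list that always contains 0 and all earlier elements) with a single pass that counts distinct nonzero values in a set and returns max(n,0) minus that count.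
import Mathlib
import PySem

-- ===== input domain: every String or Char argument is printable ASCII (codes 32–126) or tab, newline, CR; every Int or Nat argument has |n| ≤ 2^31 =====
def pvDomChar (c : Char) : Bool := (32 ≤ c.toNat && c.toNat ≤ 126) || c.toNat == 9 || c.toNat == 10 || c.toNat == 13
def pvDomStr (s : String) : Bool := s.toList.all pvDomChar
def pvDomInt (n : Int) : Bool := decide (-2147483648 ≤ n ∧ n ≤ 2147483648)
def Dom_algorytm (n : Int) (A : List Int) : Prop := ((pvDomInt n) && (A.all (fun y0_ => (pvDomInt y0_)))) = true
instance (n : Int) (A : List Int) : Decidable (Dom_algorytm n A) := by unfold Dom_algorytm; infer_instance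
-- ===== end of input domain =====

-- B counts distinct nonzero values in one pass with a set and returns max(n,0) minus that
-- count, replacing A's membership scan over a growing buffer (objective: faster).


-- ===== PORT A =====
def algorytm (n : Int) (A : List Int) : Int :=
  -- k = 0; B = [0] * n; for i in range(n): if A[i] in B: k += 1; B[i] = A[i]; return k
  -- pyGetD/pySetD are exact here: Pre_ guarantees i < n ≤ len(A) and len(B) = n > i
  (((PySem.List.pyRange 0 n 1).foldl
      (fun (st : Int × List Int) i =>
        let v := PySem.List.pyGetD A i 0
        ((if v ∈ st.2 then st.1 + 1 else st.1), PySem.List.pySetD st.2 i v))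
      (0, List.replicate n.toNat 0))).1

-- ===== PORT B =====
def algorytm_alt (n : Int) (A : List Int) : Int :=
  -- seen = set(); for i in range(n): if A[i] != 0: seen.add(A[i]); return max(n, 0) - len(seen)
  let seen : PySem.Set Int :=
    (PySem.List.pyRange 0 n 1).foldl
      (fun (s : PySem.Set Int) i =>
        let v := PySem.List.pyGetD A i 0
        if v ≠ 0 then PySem.Set.add s v else s)
      PySem.Set.empty
  max n 0 - PySem.Set.len seen

-- ===== PRECONDITION & SPEC =====
-- Pre_ excludes exactly the inputs where A raises IndexError: n > len(A) (A[i] out of range).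
def Pre_algorytm (n : Int) (A : List Int) : Prop := n ≤ (A.length : Int)
instance (n : Int) (A : List Int) : Decidable (Pre_algorytm n A) := by unfold Pre_algorytm; infer_instance
def pvWitness_algorytm : Int × List Int := (3, [2, 0, 2])

def Spec_algorytm (n : Int) (A : List Int) (out : Int) : Prop := out = algorytm_alt n A
instance (n : Int) (A : List Int) (out : Int) : Decidable (Spec_algorytm n A out) := by unfold Spec_algorytm; infer_instance

-- ===== CLAIM (what is proved, stated in full; the proofs are below) =====
def Claim_equal_algorytm : Prop := ∀ (n : Int) (A : List Int), Dom_algorytm n A → Pre_algorytm n A → Spec_algorytm n A (algorytm n A)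

-- ===== LEMMAS AND PROOFS =====

-- A's loop body and B's loop body as named functions (proof-side only).
def pvStepA (A : List Int) (st : Int × List Int) (i : Int) : Int × List Int :=
  let v := PySem.List.pyGetD A i 0
  ((if v ∈ st.2 then st.1 + 1 else st.1), PySem.List.pySetD st.2 i v)

def pvStepB (A : List Int) (s : PySem.Set Int) (i : Int) : PySem.Set Int :=
  let v := PySem.List.pyGetD A i 0
  if v ≠ 0 then PySem.Set.add s v else s

-- the index list [0, 1, …, m-1] as integers
def pvIdx (m : Nat) : List Int := (List.range m).map (fun (k : Nat) => (k : Int))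

-- B's set after the first m iterations.
def pvBset (A : List Int) (m : Nat) : PySem.Set Int :=
  (pvIdx m).foldl (pvStepB A) PySem.Set.empty

theorem pvIdx_succ (m : Nat) : pvIdx (m + 1) = pvIdx m ++ [(m : Int)] := by
  simp [pvIdx, List.range_succ]

theorem pvRange_eq (n : Int) : PySem.List.pyRange 0 n 1 = pvIdx n.toNat := by
  rw [PySem.List.pyRange_one]
  simp [pvIdx, List.map_eq_flatMap]

theorem algorytm_eq (n : Int) (A : List Int) :
    algorytm n A = ((pvIdx n.toNat).foldl (pvStepA A) (0, List.replicate n.toNat 0)).1 := by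
  unfold algorytm pvStepA; rw [pvRange_eq]

theorem algorytm_alt_eq (n : Int) (A : List Int) :
    algorytm_alt n A = max n 0 - ((pvBset A n.toNat).length : Int) := by
  unfold algorytm_alt pvBset pvStepB; rw [pvRange_eq]; simp [PySem.Set.len]

theorem pvBset_succ (A : List Int) (m : Nat) :
    pvBset A (m + 1) = pvStepB A (pvBset A m) (m : Int) := by
  unfold pvBset; rw [pvIdx_succ, List.foldl_append]; rfl

-- Joint loop invariant after m iterations (m <= N <= len A, N = n.toNat):
-- A's buffer is (A.take m) ++ zeros, A's counter is m minus the size of B's set,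
-- and B's set holds exactly the nonzero elements of A.take m.
theorem pvInvariant (A : List Int) (N : Nat) (hN : N ≤ A.length) :
    ∀ m, m ≤ N →
      ((pvIdx m).foldl (pvStepA A) (0, List.replicate N 0)
        = ((m : Int) - ((pvBset A m).length : Int), A.take m ++ List.replicate (N - m) 0))
      ∧ (∀ v : Int, v ∈ pvBset A m ↔ v ≠ 0 ∧ v ∈ A.take m) := by
  intro m
  induction m with
  | zero => intro _; refine ⟨by simp [pvIdx, pvBset], by simp [pvIdx, pvBset, PySem.Set.empty]⟩
  | succ m ih =>
    intro h
    obtain ⟨h1, h2⟩ := ih (by omega)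
    have hm : m < A.length := by omega
    have hv : PySem.List.pyGetD A (m : Int) 0 = A[m] := by
      rw [PySem.List.pyGetD_natCast]
      exact List.getD_eq_getElem A 0 hm
    have hlt : (A.take m).length = m := by simp; omega
    have hrepl : List.replicate (N - m) (0 : Int) = 0 :: List.replicate (N - (m + 1)) 0 := by
      rw [show N - m = (N - (m + 1)) + 1 by omega, List.replicate_succ]
    have htake : A.take (m + 1) = A.take m ++ [A[m]] := by
      rw [List.take_add_one, List.getElem?_eq_getElem hm]; rfl
    have hfold : (pvIdx (m + 1)).foldl (pvStepA A) (0, List.replicate N 0)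
        = pvStepA A ((pvIdx m).foldl (pvStepA A) (0, List.replicate N 0)) (m : Int) := by
      rw [pvIdx_succ, List.foldl_append]; rfl
    -- the new buffer after B[m] = A[m]
    have hset : PySem.List.pySetD (A.take m ++ List.replicate (N - m) 0) (m : Int) A[m]
        = A.take (m + 1) ++ List.replicate (N - (m + 1)) 0 := by
      rw [PySem.List.pySetD_natCast, hrepl, htake, List.append_assoc,
        List.set_append_right _ _ (by omega)]
      simp [hlt]
    -- membership in the buffer: 0 is still there (position m itself), plus the prefix
    have hmem : ∀ w : Int, w ∈ A.take m ++ List.replicate (N - m) 0 ↔ w = 0 ∨ w ∈ A.take m := by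
      intro w
      rw [List.mem_append, List.mem_replicate]
      constructor
      · rintro (hw | ⟨_, hw⟩) <;> tauto
      · rintro (hw | hw)
        · exact Or.inr ⟨by omega, hw⟩
        · exact Or.inl hw
    rw [hfold, h1, pvBset_succ]
    unfold pvStepA pvStepB
    simp only [hv, hset]
    by_cases hv0 : A[m] = 0
    · -- A counts (0 is in the buffer); B's set unchanged
      have hin : A[m] ∈ A.take m ++ List.replicate (N - m) 0 := (hmem _).2 (Or.inl hv0)
      rw [if_pos hin, if_neg (by simp [hv0])]
      refine ⟨by rw [Prod.mk.injEq]; refine ⟨by push_cast; ring, rfl⟩, ?_⟩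
      intro v
      rw [h2, htake]
      simp only [List.mem_append, List.mem_singleton]
      constructor
      · rintro ⟨hne, hmem'⟩; exact ⟨hne, Or.inl hmem'⟩
      · rintro ⟨hne, hmem' | rfl⟩
        · exact ⟨hne, hmem'⟩
        · exact absurd hv0 hne
    · by_cases hvp : A[m] ∈ A.take m
      · -- repeated nonzero value: A counts, B's set already contains it
        have hin : A[m] ∈ A.take m ++ List.replicate (N - m) 0 := (hmem _).2 (Or.inr hvp)
        rw [if_pos hin, if_pos hv0, PySem.Set.add_of_mem ((h2 _).2 ⟨hv0, hvp⟩)]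
        refine ⟨by rw [Prod.mk.injEq]; refine ⟨by push_cast; ring, rfl⟩, ?_⟩
        intro v
        rw [h2, htake]
        simp only [List.mem_append, List.mem_singleton]
        constructor
        · rintro ⟨hne, hmem'⟩; exact ⟨hne, Or.inl hmem'⟩
        · rintro ⟨hne, hmem' | rfl⟩
          · exact ⟨hne, hmem'⟩
          · exact ⟨hne, hvp⟩
      · -- fresh nonzero value: A does not count, B's set grows by one
        have hni : A[m] ∉ A.take m ++ List.replicate (N - m) 0 := by
          rw [hmem]; tauto
        have hns : A[m] ∉ pvBset A m := fun hc => hvp ((h2 _).1 hc).2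
        rw [if_neg hni, if_pos hv0, PySem.Set.add_of_not_mem hns]
        refine ⟨by rw [Prod.mk.injEq]
                   refine ⟨?_, rfl⟩
                   rw [List.length_append, List.length_singleton]
                   push_cast; omega, ?_⟩
        intro v
        rw [htake]
        simp only [List.mem_append, List.mem_singleton]
        rw [h2]
        constructor
        · rintro (⟨hne, hmem'⟩ | rfl)
          · exact ⟨hne, Or.inl hmem'⟩
          · exact ⟨hv0, Or.inr rfl⟩
        · rintro ⟨hne, hmem' | rfl⟩
          · exact Or.inl ⟨hne, hmem'⟩
          · exact Or.inr rfl

-- ===== VERDICT (by name: the statement is the Claim_ definition above) =====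
theorem algorytm_spec : Claim_equal_algorytm := by
  intro n A _ hpre
  unfold Spec_algorytm
  have hN : n.toNat ≤ A.length := by
    unfold Pre_algorytm at hpre; omega
  obtain ⟨h1, _⟩ := pvInvariant A n.toNat hN n.toNat (le_refl _)
  rw [algorytm_eq, algorytm_alt_eq, h1]
  have hmax : max n 0 = (n.toNat : Int) := by omega
  rw [hmax]
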